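-- pv_equiv track=rewrite | github.com/alessandrofd/leetcode-python | 2009-minimum-number-of-operations-to-make-array-continuous.py | minOperations_sliding_window
-- ===== SOURCE A (Python) =====
-- def minOperations_sliding_window(nums: list[int]) -> int:
--     """
--     Approach 2: Sliding Window
--
--     In the previous approach, we locked in an element uniques[i] as left,
--     calculated right, then found the insertion index of right as j. We used an
--     O(log n) binary search to find j, but we can do better using a sliding
--     window.
--
--     Because uniques is sorted:
--
--         As i increases, so does left = uniques[i].
--
--         An increase in the lower bound left means an increase in the upper bound
--         right as well.
--
--         As right increases, j either remains the same or increases.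
--
--         Thus, as i increases, j will stay the same or increase.
--
--     We initialize j = 0 and follow the same process as in the last approach.
--     Iterate i over the indices of uniques and treat each left = uniques[i] as
--     the minimum element. This gives us right = uniques[i] + n - 1 as our
--     maximum element.
--
--     How do we update j? Similar to the last approach, we have j as the index of
--     the first element out of our range. Thus, we increment j until it points to
--     an element out of our range. The condition for this is:
--
--         while (uniques[j] < uniques[i] + n)
--
--     Once this condition is broken, uniques[j] is out of our range [left, right]
--     and correctly positioned. We can calculate the number of elements already
--     in our range as j - i just like in the previous approach.
--
--     Because j starts at 0 and cannot exceed the length of newNums, it will only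
--     be incremented at most n times across the entire algorithm. This means it
--     costs O(1) amortized to calculate j, an improvement from the O(log â¡n)
--     binary search.
--     """
--
--     n = len(nums)
--
--     uniques = sorted(set(nums))
--     m = len(uniques)
--
--     opers = n
--     j = 0
--
--     for i in range(m):
--         left = uniques[i]
--         right = left + n - 1
--
--         while j < m and uniques[j] <= right:
--             j += 1
--
--         opers = min(opers, n - (j - i))
--         if opers == 0:
--             return 0
--
--     return opers
-- ===== SOURCE B (Python) =====
-- def _bisect_right(uniques, right):
--     # hand-rolled bisect.bisect_right (A imports no modules, so neither do we)
--     lo, hi = 0, len(uniques)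
--     while lo < hi:
--         mid = (lo + hi) // 2
--         if uniques[mid] <= right:
--             lo = mid + 1
--         else:
--             hi = mid
--     return lo
--
--
-- def minOperations_sliding_window(nums: list[int]) -> int:
--     n = len(nums)
--     uniques = sorted(set(nums))
--     m = len(uniques)
--     best = n
--     for i in range(m):
--         right = uniques[i] + n - 1
--         j = _bisect_right(uniques, right)
--         best = min(best, n - (j - i))
--     return best
-- ===== Notes on version B (the rewrite author's own statement) =====
-- stated objective: alternative
-- what changed: Replaces A's stateful two-pointer sliding window with an independent hand-rolled binary search (bisect_right) per unique element, and replaces A's early-return-on-zero with a plain min-fold over all positions.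
import Mathlib
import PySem

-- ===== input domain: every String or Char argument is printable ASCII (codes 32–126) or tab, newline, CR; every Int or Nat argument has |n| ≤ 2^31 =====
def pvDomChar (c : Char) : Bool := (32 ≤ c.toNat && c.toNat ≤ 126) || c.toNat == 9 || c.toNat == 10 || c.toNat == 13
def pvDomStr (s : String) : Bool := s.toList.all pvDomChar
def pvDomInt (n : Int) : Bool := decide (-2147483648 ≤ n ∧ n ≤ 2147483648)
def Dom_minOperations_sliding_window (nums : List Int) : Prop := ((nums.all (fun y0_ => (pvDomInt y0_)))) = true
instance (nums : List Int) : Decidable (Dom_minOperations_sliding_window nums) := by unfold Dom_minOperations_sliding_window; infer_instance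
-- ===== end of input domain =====

-- B replaces A's stateful two-pointer window by an independent binary search per
-- element and a plain min-fold (no early return); an alternative of the same cost.

-- ===== PORT A =====

-- A's inner 'while j < m and uniques[j] <= right: j += 1' (fuel m suffices: j rises toward m)
def pvAWhile (u : List Int) (m : Nat) (right : Int) : Nat → Nat → Nat
  | j, 0 => j
  | j, fuel + 1 =>
    if j < m ∧ u.getD j 0 ≤ right then pvAWhile u m right (j + 1) fuel else j

-- A's 'for i in range(m)' loop carrying (j, opers), with the early 'return 0' (fuel m suffices)
def pvALoop (u : List Int) (n : Int) (m : Nat) : Nat → Int → Nat → Nat → Int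
  | _, opers, _, 0 => opers
  | j, opers, i, fuel + 1 =>
    if i < m then
      let right := u.getD i 0 + n - 1
      let j' := pvAWhile u m right j m
      let opers' := min opers (n - ((j' : Int) - (i : Int)))
      if opers' = 0 then 0 else pvALoop u n m j' opers' (i + 1) fuel
    else opers

def minOperations_sliding_window (nums : List Int) : Int :=
  let n : Int := nums.length
  let u := PySem.List.sorted (PySem.Set.ofList nums) (fun x => x) false
  pvALoop u n u.length 0 n 0 u.length

-- ===== PORT B =====

-- B's hand-rolled bisect_right over the whole list (fuel m suffices: hi - lo shrinks each step)
def pvBSearch (u : List Int) (right : Int) : Nat → Nat → Nat → Nat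
  | lo, _, 0 => lo
  | lo, hi, fuel + 1 =>
    if lo < hi then
      let mid := (lo + hi) / 2
      if u.getD mid 0 ≤ right then pvBSearch u right (mid + 1) hi fuel
      else pvBSearch u right lo mid fuel
    else lo

def minOperations_sliding_window_alt (nums : List Int) : Int :=
  let n : Int := nums.length
  let u := PySem.List.sorted (PySem.Set.ofList nums) (fun x => x) false
  let m := u.length
  (List.range m).foldl
    (fun best i =>
      let right := u.getD i 0 + n - 1
      let j := pvBSearch u right 0 m m
      min best (n - ((j : Int) - (i : Int)))) n

-- ===== PRECONDITION & SPEC =====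
def Spec_minOperations_sliding_window (nums : List Int) (out : Int) : Prop := out = minOperations_sliding_window_alt nums
instance (nums : List Int) (out : Int) : Decidable (Spec_minOperations_sliding_window nums out) := by unfold Spec_minOperations_sliding_window; infer_instance

-- ===== CLAIM (what is proved, stated in full; the proofs are below) =====
def Claim_equal_minOperations_sliding_window : Prop := ∀ (nums : List Int), Dom_minOperations_sliding_window nums → Spec_minOperations_sliding_window nums (minOperations_sliding_window nums)

-- ===== LEMMAS AND PROOFS =====

-- number of elements ≤ r
def pvCnt (u : List Int) (r : Int) : Nat := u.countP (fun y => decide (y ≤ r))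

theorem pvCnt_le_length (u : List Int) (r : Int) : pvCnt u r ≤ u.length :=
  List.countP_le_length

theorem pvCnt_mono (u : List Int) {r r' : Int} (h : r ≤ r') : pvCnt u r ≤ pvCnt u r' := by
  apply List.countP_mono_left
  intro a _ ha
  simp only [decide_eq_true_eq] at *
  omega

-- on a (≤)-sorted list, position k holds an element ≤ r iff k < pvCnt
theorem pvCnt_iff (u : List Int) (hs : u.Pairwise (· ≤ ·)) (r : Int) :
    ∀ k, k < u.length → (u.getD k 0 ≤ r ↔ k < pvCnt u r) := by
  induction u with
  | nil => intro k hk; simp at hk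
  | cons a t ih =>
    intro k hk
    rcases List.pairwise_cons.mp hs with ⟨ha, ht⟩
    by_cases har : a ≤ r
    · have hc : pvCnt (a :: t) r = pvCnt t r + 1 := by
        simp [pvCnt, har]
      cases k with
      | zero => simp [hc, har]
      | succ k =>
        have := ih ht k (by simpa using hk)
        simpa [hc, Nat.succ_lt_succ_iff, List.getD_cons_succ] using this
    · have hc : pvCnt (a :: t) r = 0 := by
        have h1 : List.countP (fun y => decide (y ≤ r)) t = 0 := by
          rw [List.countP_eq_zero]
          intro y hy
          have := ha y hy
          simp only [decide_eq_true_eq]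
          omega
        simp [pvCnt, h1, har]
      cases k with
      | zero => simp [hc, har]
      | succ k =>
        have hklen : k < t.length := by simpa using hk
        have hmem : t.getD k 0 ∈ t := by
          rw [List.getD_eq_getElem t 0 hklen]
          exact List.getElem_mem hklen
        have h2 := ha _ hmem
        rw [hc]
        simp only [List.getD_cons_succ]
        constructor
        · intro hle; omega
        · intro h3; omega

theorem pvAWhile_eq (u : List Int) (hs : u.Pairwise (· ≤ ·)) (r : Int) :
    ∀ fuel j, u.length - j ≤ fuel → j ≤ pvCnt u r →
      pvAWhile u u.length r j fuel = pvCnt u r := by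
  intro fuel
  induction fuel with
  | zero =>
    intro j hd hj
    have := pvCnt_le_length u r
    simp only [pvAWhile]
    omega
  | succ fuel ih =>
    intro j hd hj
    simp only [pvAWhile]
    split_ifs with h
    · apply ih
      · omega
      · have := (pvCnt_iff u hs r j h.1).mp h.2
        omega
    · have hle := pvCnt_le_length u r
      rcases Nat.lt_or_ge j u.length with hlt | hge
      · have h2 : ¬ u.getD j 0 ≤ r := fun hh => h ⟨hlt, hh⟩
        have := (pvCnt_iff u hs r j hlt).not.mp h2
        omega
      · omega

theorem pvBSearch_eq (u : List Int) (hs : u.Pairwise (· ≤ ·)) (r : Int) :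
    ∀ fuel lo hi, hi - lo ≤ fuel → hi ≤ u.length → lo ≤ pvCnt u r → pvCnt u r ≤ hi →
      pvBSearch u r lo hi fuel = pvCnt u r := by
  intro fuel
  induction fuel with
  | zero =>
    intro lo hi hd hhi hlo hc
    simp only [pvBSearch]
    omega
  | succ fuel ih =>
    intro lo hi hd hhi hlo hc
    simp only [pvBSearch]
    split_ifs with h hle
    · have hmid : (lo + hi) / 2 < u.length := by omega
      have := (pvCnt_iff u hs r _ hmid).mp hle
      exact ih _ _ (by omega) hhi (by omega) hc
    · have hmid : (lo + hi) / 2 < u.length := by omega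
      have := (pvCnt_iff u hs r _ hmid).not.mp hle
      exact ih _ _ (by omega) (by omega) hlo (by omega)
    · omega

-- folding min from 0 over nonnegative terms stays 0
theorem pvFoldMinZero (f : Nat → Int) (l : List Nat) (hf : ∀ k, 0 ≤ f k) :
    l.foldl (fun b k => min b (f k)) 0 = 0 := by
  induction l with
  | nil => rfl
  | cons a t ih =>
    have h0 : min (0 : Int) (f a) = 0 := by
      have := hf a
      omega
    simp only [List.foldl_cons, h0]
    exact ih

theorem pvLoop_eq (u : List Int) (n : Int) (hs : u.Pairwise (· ≤ ·))
    (hmn : (u.length : Int) ≤ n) :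
    ∀ fuel i j opers, u.length - i ≤ fuel →
      (i < u.length → j ≤ pvCnt u (u.getD i 0 + n - 1)) → 0 ≤ opers →
      pvALoop u n u.length j opers i fuel =
        (List.range' i (u.length - i)).foldl
          (fun best k =>
            let right := u.getD k 0 + n - 1
            let j := pvBSearch u right 0 u.length u.length
            min best (n - ((j : Int) - (k : Int)))) opers := by
  have hbs : ∀ k : Nat, pvBSearch u (u.getD k 0 + n - 1) 0 u.length u.length
      = pvCnt u (u.getD k 0 + n - 1) := fun k =>
    pvBSearch_eq u hs _ u.length 0 u.length (by omega) le_rfl (Nat.zero_le _)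
      (pvCnt_le_length u _)
  have hnonneg : ∀ k : Nat,
      (0 : Int) ≤ n - (((pvCnt u (u.getD k 0 + n - 1) : Nat) : Int) - (k : Int)) := by
    intro k
    have h1 := pvCnt_le_length u (u.getD k 0 + n - 1)
    have h2 : ((pvCnt u (u.getD k 0 + n - 1) : Nat) : Int) ≤ (u.length : Int) := by
      exact_mod_cast h1
    omega
  intro fuel
  induction fuel with
  | zero =>
    intro i j opers hd hj hop
    rw [show u.length - i = 0 by omega]
    simp only [pvALoop]
    rfl
  | succ fuel ih =>
    intro i j opers hd hj hop
    by_cases hi : i < u.length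
    · simp only [pvALoop, if_pos hi]
      have hw : pvAWhile u u.length (u.getD i 0 + n - 1) j u.length
          = pvCnt u (u.getD i 0 + n - 1) :=
        pvAWhile_eq u hs _ u.length j (by omega) (hj hi)
      have hr : List.range' i (u.length - i)
          = i :: List.range' (i + 1) (u.length - (i + 1)) := by
        rw [show u.length - i = (u.length - (i + 1)) + 1 by omega, List.range'_succ]
      rw [hr, hw]
      split_ifs with hz
      · -- A returns 0 early; B's remaining min-fold of nonnegative terms from 0 stays 0
        simp only [List.foldl_cons, hbs, hz]
        exact (pvFoldMinZero _ _ hnonneg).symm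
      · have hnext : i + 1 < u.length →
            pvCnt u (u.getD i 0 + n - 1) ≤ pvCnt u (u.getD (i + 1) 0 + n - 1) := by
          intro hi1
          apply pvCnt_mono
          have hmono : u.getD i 0 ≤ u.getD (i + 1) 0 := by
            rw [List.getD_eq_getElem u 0 hi, List.getD_eq_getElem u 0 hi1]
            exact List.pairwise_iff_getElem.mp hs i (i + 1) hi hi1 (by omega)
          omega
        rw [ih (i + 1) _ _ (by omega) hnext (le_min hop (hnonneg i))]
        simp only [List.foldl_cons, hbs]
    · simp only [pvALoop, if_neg hi]
      rw [show u.length - i = 0 by omega]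
      rfl

theorem pvLenOfListLe (xs : List Int) : (PySem.Set.ofList xs).length ≤ xs.length := by
  rw [PySem.Set.ofList_eq_foldl]
  suffices h : ∀ s : List Int, (xs.foldl PySem.Set.add s).length ≤ s.length + xs.length by
    simpa using h []
  induction xs with
  | nil => intro s; simp
  | cons a t ih =>
    intro s
    have hadd : (PySem.Set.add s a).length ≤ s.length + 1 := by
      simp only [PySem.Set.add]
      split_ifs <;> simp
    calc ((a :: t).foldl PySem.Set.add s).length = (t.foldl PySem.Set.add (PySem.Set.add s a)).length := by simp
      _ ≤ (PySem.Set.add s a).length + t.length := ih _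
      _ ≤ s.length + (a :: t).length := by simp; omega

-- ===== VERDICT (by name: the statement is the Claim_ definition above) =====
theorem minOperations_sliding_window_spec : Claim_equal_minOperations_sliding_window := by
  intro nums _
  unfold Spec_minOperations_sliding_window minOperations_sliding_window minOperations_sliding_window_alt
  simp only []
  have hs : (PySem.List.sorted (PySem.Set.ofList nums) (fun x => x) false).Pairwise (· ≤ ·) :=
    (PySem.List.sorted_ofList_pairwise_lt nums).imp le_of_lt
  have hlen : (((PySem.List.sorted (PySem.Set.ofList nums) (fun x => x) false).length : Int))
      ≤ (nums.length : Int) := by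
    have h1 : (PySem.List.sorted (PySem.Set.ofList nums) (fun x => x) false).length
        = (PySem.Set.ofList nums).length := PySem.List.length_sorted _ _ _
    have h2 := pvLenOfListLe nums
    omega
  rw [pvLoop_eq _ _ hs hlen ((PySem.List.sorted (PySem.Set.ofList nums) (fun x => x) false).length)
      0 0 (nums.length : Int) le_rfl (fun _ => Nat.zero_le _) (by positivity)]
  rw [List.range_eq_range']
  norm_num
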